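-- pv_equiv track=rewrite | github.com/ishitachaturvedi/gpgpu-sim_distribution | fast_v2_indep_SM_sched.py | init_four
-- ===== SOURCE A (Python) =====
-- def init_four(num_shaders,num_sched,numStalls):
--     warp_four_c = []
--     for shader in range(num_shaders):
--         warp_shader = []
--         for sched in range(num_sched):
--             warp_sched = []
--             for i in range(numStalls):
--                 stall1 = []
--                 for j in range(i+1,numStalls):
--                     stall2 = []
--                     for k in range(j+1,numStalls):
--                         stall3 = []
--                         for k1 in range(k+1,numStalls):
--                             stall3.append(0)
--                         stall2.append(stall3)
--                     stall1.append(stall2)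
--                 warp_sched.append(stall1)
--             warp_shader.append(warp_sched)
--         warp_four_c.append(warp_shader)
--     return warp_four_c
-- ===== SOURCE B (Python) =====
-- def init_four(num_shaders, num_sched, numStalls):
--     # Bottom-up instead of four nested stall-loops: build(s, d+1) is just the
--     # suffix level_d[s+1:], so each level is a suffix-slice of the previous one
--     # and sub-blocks are shared instead of rebuilt.
--     if num_shaders <= 0:
--         return []
--     if num_sched <= 0:
--         return [[] for _ in range(num_shaders)]
--     def step(level):
--         return [level[s + 1:] for s in range(numStalls)]
--     level0 = [[0 for _ in range(s + 1, numStalls)] for s in range(numStalls)]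
--     block = step(step(level0))
--     return [[block for _ in range(num_sched)] for _ in range(num_shaders)]
-- ===== Notes on version B (the rewrite author's own statement) =====
-- stated objective: alternative
-- what changed: Replaces the four nested stall-loops with a bottom-up construction where each nesting level is a suffix slice of the previous one, sharing sub-blocks instead of rebuilding them (return value identical; B's sublists are aliased where A's are fresh).
import Mathlib
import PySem

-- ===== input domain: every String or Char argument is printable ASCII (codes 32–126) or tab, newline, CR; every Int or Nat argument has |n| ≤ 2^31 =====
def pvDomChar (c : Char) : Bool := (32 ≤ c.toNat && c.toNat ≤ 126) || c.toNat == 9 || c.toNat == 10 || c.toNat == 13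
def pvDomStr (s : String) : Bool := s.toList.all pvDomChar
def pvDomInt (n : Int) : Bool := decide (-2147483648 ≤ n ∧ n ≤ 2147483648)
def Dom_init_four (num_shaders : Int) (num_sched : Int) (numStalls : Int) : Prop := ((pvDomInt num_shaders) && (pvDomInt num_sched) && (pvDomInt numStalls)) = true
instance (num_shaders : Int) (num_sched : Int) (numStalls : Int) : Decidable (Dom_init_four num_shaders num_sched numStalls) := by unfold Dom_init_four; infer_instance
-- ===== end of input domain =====

-- ===== PORT A =====
-- literal transliteration of A: six nested loops, each appending into a fresh list (written as maps over ranges)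
def init_four (num_shaders : Int) (num_sched : Int) (numStalls : Int) : List (List (List (List (List (List Int))))) :=
  (PySem.List.pyRange 0 num_shaders 1).map (fun _ =>
    (PySem.List.pyRange 0 num_sched 1).map (fun _ =>
      (PySem.List.pyRange 0 numStalls 1).map (fun i =>
        (PySem.List.pyRange (i + 1) numStalls 1).map (fun j =>
          (PySem.List.pyRange (j + 1) numStalls 1).map (fun k =>
            (PySem.List.pyRange (k + 1) numStalls 1).map (fun _ => (0 : Int)))))))

-- ===== PORT B =====
-- B builds the block bottom-up: level_{d+1}[s] is the suffix slice level_d[s+1:], sharing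
-- sub-blocks instead of rebuilding them (same return value; in Python, B aliases sublists where A allocates fresh ones).
def bstep {A : Type} (numStalls : Int) (level : List A) : List (List A) :=
  (PySem.List.pyRange 0 numStalls 1).map (fun s => PySem.List.slice level (some (s + 1)) none)

def init_four_alt (num_shaders : Int) (num_sched : Int) (numStalls : Int) : List (List (List (List (List (List Int))))) :=
  if num_shaders ≤ 0 then []
  else if num_sched ≤ 0 then (PySem.List.pyRange 0 num_shaders 1).map (fun _ => [])
  else
    let level0 : List (List Int) :=
      (PySem.List.pyRange 0 numStalls 1).map (fun s =>
        (PySem.List.pyRange (s + 1) numStalls 1).map (fun _ => (0 : Int)))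
    let block := bstep numStalls (bstep numStalls level0)
    (PySem.List.pyRange 0 num_shaders 1).map (fun _ =>
      (PySem.List.pyRange 0 num_sched 1).map (fun _ => block))

-- ===== PRECONDITION & SPEC =====
def Spec_init_four (num_shaders : Int) (num_sched : Int) (numStalls : Int) (out : List (List (List (List (List (List Int)))))) : Prop := out = init_four_alt num_shaders num_sched numStalls
instance (num_shaders : Int) (num_sched : Int) (numStalls : Int) (out : List (List (List (List (List (List Int)))))) : Decidable (Spec_init_four num_shaders num_sched numStalls out) := by unfold Spec_init_four; infer_instance

-- ===== CLAIM (what is proved, stated in full; the proofs are below) =====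
def Claim_equal_init_four : Prop := ∀ (num_shaders : Int) (num_sched : Int) (numStalls : Int), Dom_init_four num_shaders num_sched numStalls → Spec_init_four num_shaders num_sched numStalls (init_four num_shaders num_sched numStalls)

-- ===== LEMMAS AND PROOFS =====

-- ===== LEMMAS =====
theorem drop_pyRange_one (a b : Int) (k : Nat) :
    (PySem.List.pyRange a b 1).drop k = PySem.List.pyRange (a + k) b 1 := by
  induction k generalizing a with
  | zero => simp
  | succ k ih =>
    by_cases h : a < b
    · rw [PySem.List.pyRange_one_cons h]
      simp only [List.drop_succ_cons]
      rw [ih (a + 1)]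
      congr 1
      push_cast
      ring
    · have h1 : PySem.List.pyRange a b 1 = [] := by
        rw [PySem.List.pyRange_one]
        have : (b - a).toNat = 0 := by omega
        simp [this]
      have h2 : PySem.List.pyRange (a + ((k : Int) + 1)) b 1 = [] := by
        rw [PySem.List.pyRange_one]
        have : (b - (a + ((k : Int) + 1))).toNat = 0 := by omega
        simp [this]
      push_cast
      simp [h1, h2]

theorem slice_map_pyRange {A : Type} (f : Int → A) (n s : Int) (hs : 0 ≤ s) :
    PySem.List.slice ((PySem.List.pyRange 0 n 1).map f) (some (s + 1)) none
      = (PySem.List.pyRange (s + 1) n 1).map f := by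
  rw [PySem.List.slice_from _ (by omega : (0:Int) ≤ s + 1), ← List.map_drop, drop_pyRange_one]
  have h1 : (0 : Int) + (((s + 1).toNat : Nat) : Int) = s + 1 := by omega
  rw [h1]

theorem bstep_map_pyRange {A : Type} (f : Int → A) (n : Int) :
    bstep n ((PySem.List.pyRange 0 n 1).map f)
      = (PySem.List.pyRange 0 n 1).map (fun s => (PySem.List.pyRange (s + 1) n 1).map f) := by
  unfold bstep
  apply List.map_congr_left
  intro s hs
  exact slice_map_pyRange f n s ((PySem.List.mem_pyRange_one.mp hs).1)

-- ===== VERDICT (by name: the statement is the Claim_ definition above) =====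
theorem init_four_spec : Claim_equal_init_four := by
  intro ns nc nst _
  unfold Spec_init_four init_four init_four_alt
  have hz : ∀ m : Int, m ≤ 0 → PySem.List.pyRange 0 m 1 = [] := by
    intro m hm
    rw [PySem.List.pyRange_one]
    simp
    omega
  by_cases h1 : ns ≤ 0
  · simp [h1, hz ns h1]
  · by_cases h2 : nc ≤ 0
    · simp [h1, h2, hz nc h2]
    · simp only [h1, h2, if_false, bstep_map_pyRange]
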